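-- pv_equiv track=rewrite | github.com/paudirac/advent2021 | src/advent2021/navigation.py | completion_score
-- ===== SOURCE A (Python) =====
-- def completion_score(completion):
--     score = {
--         ')': 1,
--         ']': 2,
--         '}': 3,
--         '>': 4,
--     }
--     total_score = 0
--     for c in completion:
--         total_score *= 5
--         total_score += score[c]
--     return total_score
-- ===== SOURCE B (Python) =====
-- def completion_score(completion):
--     value = {
--         ')': 1,
--         ']': 2,
--         '}': 3,
--         '>': 4,
--     }
--     total = 0
--     place = 1
--     for c in reversed(completion):
--         total += value[c] * place
--         place *= 5
--     return total
-- ===== Notes on version B (the rewrite author's own statement) =====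
-- stated objective: alternative
-- what changed: Replaces Horner-style left-to-right accumulation (total = total*5 + value) by an explicit positional base-5 sum: traverse the string reversed while maintaining a running place value multiplied by 5 per step.
import Mathlib
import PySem

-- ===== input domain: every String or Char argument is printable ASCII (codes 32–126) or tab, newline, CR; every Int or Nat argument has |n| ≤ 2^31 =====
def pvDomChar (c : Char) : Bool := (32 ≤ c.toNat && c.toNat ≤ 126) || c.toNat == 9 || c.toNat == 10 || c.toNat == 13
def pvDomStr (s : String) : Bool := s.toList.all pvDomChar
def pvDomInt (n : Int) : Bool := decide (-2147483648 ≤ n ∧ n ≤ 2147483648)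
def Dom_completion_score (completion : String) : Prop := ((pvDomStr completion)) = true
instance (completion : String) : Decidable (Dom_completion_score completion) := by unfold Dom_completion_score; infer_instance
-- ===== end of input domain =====

-- B replaces A's Horner accumulation by a reversed traversal with an explicit running place value (alternative decomposition, same cost).

-- ===== PORT A =====
-- A's score dict lookup, as a total function; invalid chars are excluded by Pre_ (Python raises KeyError there).
def scoreA (c : Char) : Int :=
  if c = ')' then 1 else if c = ']' then 2 else if c = '}' then 3 else if c = '>' then 4 else 0

def completion_score (completion : String) : Int :=
  completion.toList.foldl (fun total_score c => total_score * 5 + scoreA c) 0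

-- ===== PORT B =====
def scoreB (c : Char) : Int :=
  if c = ')' then 1 else if c = ']' then 2 else if c = '}' then 3 else if c = '>' then 4 else 0

def bstep (s : Int × Int) (c : Char) : Int × Int := (s.1 + scoreB c * s.2, s.2 * 5)

def completion_score_alt (completion : String) : Int :=
  (completion.toList.reverse.foldl bstep (0, 1)).1

-- ===== PRECONDITION & SPEC =====
-- Pre_ excludes strings containing a character other than ) ] } > : on those the Python A (and B) raises KeyError.
def Pre_completion_score (completion : String) : Prop :=
  (completion.toList.all fun c => c == ')' || c == ']' || c == '}' || c == '>') = true
instance (completion : String) : Decidable (Pre_completion_score completion) := by unfold Pre_completion_score; infer_instance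
def pvWitness_completion_score : String := "])}>"

def Spec_completion_score (completion : String) (out : Int) : Prop := out = completion_score_alt completion
instance (completion : String) (out : Int) : Decidable (Spec_completion_score completion out) := by unfold Spec_completion_score; infer_instance

-- ===== CLAIM (what is proved, stated in full; the proofs are below) =====
def Claim_equal_completion_score : Prop := ∀ (completion : String), Dom_completion_score completion → Pre_completion_score completion → Spec_completion_score completion (completion_score completion)

-- ===== LEMMAS AND PROOFS =====

-- positional base-5 value of a list read least-significant-first
def Qv : List Char → Int
  | [] => 0
  | c :: r => scoreB c + 5 * Qv r

lemma Qv_append (xs : List Char) (c : Char) :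
    Qv (xs ++ [c]) = Qv xs + 5 ^ xs.length * scoreB c := by
  induction xs with
  | nil => simp [Qv]
  | cons x r ih => simp [Qv, ih, pow_succ]; ring

lemma bfold (xs : List Char) (t m : Int) :
    xs.foldl bstep (t, m) = (t + m * Qv xs, m * 5 ^ xs.length) := by
  induction xs generalizing t m with
  | nil => simp [Qv]
  | cons x r ih => simp [bstep, Qv, ih, pow_succ]; constructor <;> ring

lemma horner (l : List Char) (acc : Int) :
    l.foldl (fun total_score c => total_score * 5 + scoreA c) acc
      = acc * 5 ^ l.length + Qv l.reverse := by
  induction l generalizing acc with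
  | nil => simp [Qv]
  | cons c r ih =>
      have hs : scoreA c = scoreB c := rfl
      simp [List.foldl, ih, Qv_append, hs, pow_succ]
      ring

-- ===== VERDICT (by name: the statement is the Claim_ definition above) =====
theorem completion_score_spec : Claim_equal_completion_score := by
  intro completion _ _
  unfold Spec_completion_score completion_score completion_score_alt
  rw [horner, bfold]
  simp
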